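-- pv_equiv track=rewrite | github.com/zaemon1251-hesty/Atcoder_codes | exam/202305_L.py | solve
-- ===== SOURCE A (Python) =====
-- from math import gcd
-- from functools import reduce
--
-- def solve(left: int, right: int, n: list[int]):
--     m = len(n)
--
--     # 包除原理
--     death_num = 0
--     for i in range(1 << m):
--         candidates = []
--         for j in range(m):
--             if i >> j & 1:
--                 candidates.append(n[j])
--
--         # 何も選ばない場合はスキップ
--         if len(candidates) == 0:
--             continue
--
--         lcm_value = lcm(candidates)
--         death_num += (right // lcm_value - (left - 1) // lcm_value) * (-1) ** (len(candidates) - 1)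
--
--     # [left, right]からdeath_numを引く
--     ans = right - left + 1 - death_num
--
--     return ans
--
-- def lcm(x_list: list[int]) -> int:
--     def _lcm(x: int, y: int) -> int:
--         return (x * y) // gcd(x, y)
--
--     return reduce(_lcm, x_list)
-- ===== SOURCE B (Python) =====
-- from math import gcd
--
--
-- def solve(left: int, right: int, n: list[int]):
--     # Inclusion-exclusion by DFS over the list, threading a running LCM and
--     # an include-depth instead of enumerating bitmasks and rebuilding subsets.
--     def dfs(rest, cur, depth):
--         if not rest:
--             if depth == 0:
--                 return 0
--             return (right // cur - (left - 1) // cur) * (-1) ** (depth - 1)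
--         x, rest2 = rest[0], rest[1:]
--         nxt = x if depth == 0 else (cur * x) // gcd(cur, x)
--         return dfs(rest2, cur, depth) + dfs(rest2, nxt, depth + 1)
--
--     return right - left + 1 - dfs(n, 0, 0)
-- ===== Notes on version B (the rewrite author's own statement) =====
-- stated objective: alternative
-- what changed: Replaced the 2^m bitmask loop that rebuilds each subset list and re-reduces its LCM with a recursive include/exclude DFS over the list that threads a running LCM and include-depth and never materialises subsets.
import Mathlib
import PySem

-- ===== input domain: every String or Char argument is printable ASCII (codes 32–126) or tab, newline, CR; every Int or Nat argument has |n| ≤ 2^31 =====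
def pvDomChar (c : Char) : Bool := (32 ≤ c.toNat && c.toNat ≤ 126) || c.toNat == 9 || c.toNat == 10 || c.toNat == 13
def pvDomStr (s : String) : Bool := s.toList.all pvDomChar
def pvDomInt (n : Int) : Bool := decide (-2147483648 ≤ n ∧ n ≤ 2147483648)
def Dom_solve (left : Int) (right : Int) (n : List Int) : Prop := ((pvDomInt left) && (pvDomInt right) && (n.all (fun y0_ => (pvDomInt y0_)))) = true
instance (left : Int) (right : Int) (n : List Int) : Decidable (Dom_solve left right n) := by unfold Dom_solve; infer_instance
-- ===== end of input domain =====

-- B replaces A's 2^m bitmask enumeration (rebuilding each subset and re-reducing its LCM)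
-- by a DFS over the list that threads a running LCM and include-depth; same subset terms, different decomposition.


-- ===== PORT A =====
-- _lcm(x, y) = (x * y) // gcd(x, y)  (math.gcd = gcd of absolute values); shared by both Pythons
def pyLcm (x y : Int) : Int := PySem.Int.floordiv (x * y) ((Int.gcd x y : Nat) : Int)

-- lcm(x_list) = reduce(_lcm, x_list); reduce raises on [], which A's skip guard makes unreachable
def lcmA (xs : List Int) : Int :=
  match xs with
  | [] => 0   -- unreachable in solve (empty selection is skipped)
  | h :: t => t.foldl pyLcm h

-- inner loop: candidates = [n[j] for j in range(m) if i >> j & 1]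
def candsA (i : Int) (n : List Int) : List Int :=
  (PySem.List.pyRange 0 (n.length : Int) 1).foldl
    (fun cands j =>
      if PySem.Int.band (i >>> j.toNat) 1 == 1 then cands ++ [PySem.List.pyGetD n j 0] else cands) []

def solve (left : Int) (right : Int) (n : List Int) : Int :=
  let m := n.length
  let death_num :=
    (PySem.List.pyRange 0 ((2 : Int) ^ m) 1).foldl
      (fun death_num i =>
        let candidates := candsA i n
        if candidates.length == 0 then death_num
        else
          let lcm_value := lcmA candidates
          death_num + (PySem.Int.floordiv right lcm_value - PySem.Int.floordiv (left - 1) lcm_value)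
              * (-1) ^ (candidates.length - 1)) 0
  right - left + 1 - death_num

-- ===== PORT B =====
-- dfs(rest, cur, depth): include/exclude the head, threading the running LCM `cur` and include-depth
def dfsB (left right : Int) : List Int → Int → Nat → Int
  | [], cur, depth =>
      if depth = 0 then 0
      else (PySem.Int.floordiv right cur - PySem.Int.floordiv (left - 1) cur) * (-1) ^ (depth - 1)
  | x :: rest, cur, depth =>
      let nxt := if depth = 0 then x else pyLcm cur x
      dfsB left right rest cur depth + dfsB left right rest nxt (depth + 1)

def solve_alt (left : Int) (right : Int) (n : List Int) : Int :=
  right - left + 1 - dfsB left right n 0 0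

-- ===== PRECONDITION & SPEC =====
-- Pre_ excludes lists containing 0: there Python A raises ZeroDivisionError (right // lcm with lcm = 0).
def Pre_solve (left : Int) (right : Int) (n : List Int) : Prop := ∀ x ∈ n, x ≠ 0
instance (left : Int) (right : Int) (n : List Int) : Decidable (Pre_solve left right n) := by
  unfold Pre_solve; infer_instance

def pvWitness_solve : Int × Int × List Int := (1, 10, [2, 3])

def Spec_solve (left : Int) (right : Int) (n : List Int) (out : Int) : Prop := out = solve_alt left right n
instance (left : Int) (right : Int) (n : List Int) (out : Int) : Decidable (Spec_solve left right n out) := by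
  unfold Spec_solve; infer_instance

-- ===== CLAIM (what is proved, stated in full; the proofs are below) =====
def Claim_equal_solve : Prop := ∀ (left : Int) (right : Int) (n : List Int), Dom_solve left right n → Pre_solve left right n → Spec_solve left right n (solve left right n)

-- ===== LEMMAS AND PROOFS =====

-- the subset of n selected by the bits of K (bit 0 ↔ head)
def candsN : Nat → List Int → List Int
  | _, [] => []
  | K, x :: rest => (if K % 2 = 1 then [x] else []) ++ candsN (K / 2) rest

-- the (running-lcm, include-depth) state after additionally selecting every element of c
def afterS (cur : Int) (depth : Nat) (c : List Int) : Int × Nat :=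
  c.foldl (fun s x => (if s.2 = 0 then x else pyLcm s.1 x, s.2 + 1)) (cur, depth)

-- the inclusion-exclusion term of a final state (0 for the empty selection)
def leafT (l r : Int) (s : Int × Nat) : Int :=
  if s.2 = 0 then 0
  else (PySem.Int.floordiv r s.1 - PySem.Int.floordiv (l - 1) s.1) * (-1) ^ (s.2 - 1)

lemma afterS_cons (cur : Int) (depth : Nat) (x : Int) (c : List Int) :
    afterS cur depth (x :: c) = afterS (if depth = 0 then x else pyLcm cur x) (depth + 1) c := by
  simp [afterS]

lemma afterS_pos (c : List Int) : ∀ (cur : Int) (depth : Nat), depth ≠ 0 →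
    afterS cur depth c = (c.foldl pyLcm cur, depth + c.length) := by
  induction c with
  | nil => intro cur depth h; simp [afterS]
  | cons y c ih =>
      intro cur depth h
      rw [afterS_cons, if_neg h, ih _ _ (by omega)]
      simp
      omega

lemma leafT_afterS_zero (l r : Int) (c : List Int) :
    leafT l r (afterS 0 0 c) =
      if c.length = 0 then 0
      else (PySem.Int.floordiv r (lcmA c) - PySem.Int.floordiv (l - 1) (lcmA c)) * (-1) ^ (c.length - 1) := by
  cases c with
  | nil => simp [afterS, leafT]
  | cons h t =>
      rw [afterS_cons, if_pos rfl, afterS_pos _ _ _ (by omega)]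
      simp [leafT, lcmA]

lemma list_sum_double (f : Nat → Int) (k : Nat) :
    ((List.range (2 * k)).map f).sum = ((List.range k).map (fun q => f (2 * q) + f (2 * q + 1))).sum := by
  induction k with
  | zero => simp
  | succ k ih =>
      have h2 : 2 * (k + 1) = (2 * k + 1) + 1 := by omega
      rw [h2, List.range_succ, List.range_succ, List.range_succ]
      simp [ih]

lemma candsN_double_even (q : Nat) (x : Int) (rest : List Int) :
    candsN (2 * q) (x :: rest) = candsN q rest := by
  have h1 : (2 * q) % 2 = 0 := by omega
  have h2 : (2 * q) / 2 = q := by omega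
  simp [candsN, h1, h2]

lemma candsN_double_odd (q : Nat) (x : Int) (rest : List Int) :
    candsN (2 * q + 1) (x :: rest) = x :: candsN q rest := by
  have h1 : (2 * q + 1) % 2 = 1 := by omega
  have h2 : (2 * q + 1) / 2 = q := by omega
  simp [candsN, h1, h2]

-- B characterised: the DFS sums the leaf term over all 2^|n| bit-selected subsets
lemma dfsB_eq (l r : Int) (n : List Int) : ∀ (cur : Int) (depth : Nat),
    dfsB l r n cur depth
      = ((List.range (2 ^ n.length)).map (fun K => leafT l r (afterS cur depth (candsN K n)))).sum := by
  induction n with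
  | nil =>
      intro cur depth
      simp [dfsB, leafT, afterS, candsN]
  | cons x rest ih =>
      intro cur depth
      have hp : (2 : Nat) ^ (x :: rest).length = 2 * 2 ^ rest.length := by
        simp [List.length_cons]; ring
      rw [dfsB, ih, ih, hp, list_sum_double]
      have : ∀ q : Nat,
          (fun q => leafT l r (afterS cur depth (candsN (2 * q) (x :: rest)))
             + leafT l r (afterS cur depth (candsN (2 * q + 1) (x :: rest)))) q
          = (fun q => leafT l r (afterS cur depth (candsN q rest))
             + leafT l r (afterS (if depth = 0 then x else pyLcm cur x) (depth + 1) (candsN q rest))) q := by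
        intro q
        simp only [candsN_double_even, candsN_double_odd, afterS_cons]
      rw [List.map_congr_left (fun q _ => this q), PySem.List.sum_map_add_int]

-- A's inner candidate loop equals the structural bit selection
lemma sel_eq (n : List Int) : ∀ (K : Nat),
    ((List.range n.length).filter (fun k => (K >>> k) % 2 == 1)).map (fun k => n.getD k 0)
      = candsN K n := by
  induction n with
  | nil => intro K; simp [candsN]
  | cons x rest ih =>
      intro K
      have ih' := ih (K / 2)
      simp only [List.getD_eq_getElem?_getD] at ih'
      by_cases h : K % 2 = 1
      · simp [List.range_succ_eq_map, List.filter_map, List.map_map,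
          Function.comp_def, Nat.shiftRight_succ_inside, Nat.shiftRight_zero, h, candsN,
          List.getD_eq_getElem?_getD, ih']
      · simp [List.range_succ_eq_map, List.filter_map, List.map_map,
          Function.comp_def, Nat.shiftRight_succ_inside, Nat.shiftRight_zero, h, candsN,
          List.getD_eq_getElem?_getD, ih']

lemma candsA_eq (n : List Int) (K : Nat) : candsA (K : Int) n = candsN K n := by
  have hband : ∀ (M : Nat), PySem.Int.band (M : Int) 1 = ((M % 2 : Nat) : Int) := by
    intro M; simpa [Nat.and_one_is_mod] using PySem.Int.band_natCast M 1
  rw [candsA, PySem.List.foldl_append_if, List.nil_append, PySem.List.pyRange_one]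
  have hlen : (((n.length : Int)) - 0).toNat = n.length := by simp
  rw [hlen, List.filter_map, List.map_map]
  rw [show ((List.range n.length).filter
        ((fun j : Int => PySem.Int.band ((K : Int) >>> ((j.toNat : Nat) : Int)) 1 == 1) ∘ (fun k : Nat => (0 : Int) + ↑k)))
      = (List.range n.length).filter (fun k => (K >>> k) % 2 == 1) from
    List.filter_congr (by
      intro k _
      simp only [Function.comp_def]
      have h0 : (((0 : Int) + (k : Int)).toNat : Int) = (k : Int) := by simp
      rw [h0, Int.shiftRight_natCast, hband]
      rcases Nat.mod_two_eq_zero_or_one (K >>> k) with hh | hh <;> rw [hh] <;> decide)]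
  rw [show ((fun j : Int => PySem.List.pyGetD n j 0) ∘ (fun k : Nat => (0 : Int) + ↑k))
      = (fun k : Nat => n.getD k 0) from by
    funext k
    simp [Function.comp, PySem.List.pyGetD_natCast]]
  exact sel_eq n K

-- the per-mask body of A's outer loop equals the leaf term of the common state
lemma bodyA_eq (l r : Int) (n : List Int) (K : Nat) :
    (if (candsA (K : Int) n).length == 0 then (0 : Int)
     else (PySem.Int.floordiv r (lcmA (candsA (K : Int) n)) - PySem.Int.floordiv (l - 1) (lcmA (candsA (K : Int) n)))
        * (-1) ^ ((candsA (K : Int) n).length - 1))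
    = leafT l r (afterS 0 0 (candsN K n)) := by
  rw [candsA_eq, leafT_afterS_zero]
  simp

-- ===== VERDICT (by name: the statement is the Claim_ definition above) =====
theorem solve_spec : Claim_equal_solve := by
  intro l r n _ _
  unfold Spec_solve
  simp only [solve, solve_alt]
  have hfold :
      (PySem.List.pyRange 0 ((2 : Int) ^ n.length) 1).foldl
        (fun death i =>
          if (candsA i n).length == 0 then death
          else death + (PySem.Int.floordiv r (lcmA (candsA i n)) - PySem.Int.floordiv (l - 1) (lcmA (candsA i n)))
              * (-1) ^ ((candsA i n).length - 1)) 0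
      = ((PySem.List.pyRange 0 ((2 : Int) ^ n.length) 1).map
          (fun i => if (candsA i n).length == 0 then (0 : Int)
            else (PySem.Int.floordiv r (lcmA (candsA i n)) - PySem.Int.floordiv (l - 1) (lcmA (candsA i n)))
              * (-1) ^ ((candsA i n).length - 1))).sum := by
    rw [show (fun (death : Int) (i : Int) =>
          if (candsA i n).length == 0 then death
          else death + (PySem.Int.floordiv r (lcmA (candsA i n)) - PySem.Int.floordiv (l - 1) (lcmA (candsA i n)))
              * (-1) ^ ((candsA i n).length - 1))
        = (fun (death : Int) (i : Int) => death +
            (if (candsA i n).length == 0 then (0 : Int)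
             else (PySem.Int.floordiv r (lcmA (candsA i n)) - PySem.Int.floordiv (l - 1) (lcmA (candsA i n)))
              * (-1) ^ ((candsA i n).length - 1))) from by
          funext death i; split <;> simp]
    rw [PySem.List.foldl_add]; simp
  rw [hfold, dfsB_eq]
  rw [PySem.List.pyRange_one, List.map_map]
  have hN : ((2 : Int) ^ n.length - 0).toNat = 2 ^ n.length := by
    rw [sub_zero]
    have : ((2 : Int) ^ n.length) = ((2 ^ n.length : Nat) : Int) := by push_cast; ring
    rw [this, Int.toNat_natCast]
  rw [hN]
  congr 1
  refine congrArg List.sum ?_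
  apply List.map_congr_left
  intro K _
  simpa [Function.comp] using bodyA_eq l r n K
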